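-- pv_equiv track=rewrite | github.com/vyiirus11/PA_3 | main.py | hvlcs
-- ===== SOURCE A (Python) =====
-- def hvlcs(a, b, weights):
--     n = len(a)
--     m = len(b)
--
--     # dp[i][j] = maximum value of a common subsequence
--     # using a[:i] and b[:j]
--     dp = [[0] * (m + 1) for _ in range(n + 1)]
--
--     for i in range(1, n + 1):
--         for j in range(1, m + 1):
--             if a[i - 1] == b[j - 1]:
--                 dp[i][j] = dp[i - 1][j - 1] + weights[a[i - 1]]
--             else:
--                 dp[i][j] = max(dp[i - 1][j], dp[i][j - 1])
--
--     # backtrack to rebuild one optimal subsequence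
--     i = n
--     j = m
--     subsequence = []
--
--     while i > 0 and j > 0:
--         if a[i - 1] == b[j - 1] and dp[i][j] == dp[i - 1][j - 1] + weights[a[i - 1]]:
--             subsequence.append(a[i - 1])
--             i -= 1
--             j -= 1
--         elif dp[i - 1][j] >= dp[i][j - 1]:
--             i -= 1
--         else:
--             j -= 1
--
--     subsequence.reverse()
--     return dp[n][m], "".join(subsequence)
-- ===== SOURCE B (Python) =====
-- def hvlcs(a, b, weights):
--     # single forward pass: each cell stores (value, subsequence); no backtracking pass
--     prev = [(0, "")] * (len(b) + 1)
--     for ch in a: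
--         cur = [(0, "")]
--         left = (0, "")
--         for j, bc in enumerate(b, 1):
--             if ch == bc:
--                 pv, ps = prev[j - 1]
--                 left = (pv + weights[ch], ps + ch)
--             else:
--                 up = prev[j]
--                 left = up if up[0] >= left[0] else left
--             cur.append(left)
--         prev = cur
--     return prev[-1]
-- ===== Notes on version B (the rewrite author's own statement) =====
-- stated objective: simpler
-- what changed: B replaces A's int dp table plus a second backtracking while-loop by a single forward pass whose cells store (value, subsequence) pairs with the same >=-tie-break, so the answer is read off the last cell directly.
import Mathlib
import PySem

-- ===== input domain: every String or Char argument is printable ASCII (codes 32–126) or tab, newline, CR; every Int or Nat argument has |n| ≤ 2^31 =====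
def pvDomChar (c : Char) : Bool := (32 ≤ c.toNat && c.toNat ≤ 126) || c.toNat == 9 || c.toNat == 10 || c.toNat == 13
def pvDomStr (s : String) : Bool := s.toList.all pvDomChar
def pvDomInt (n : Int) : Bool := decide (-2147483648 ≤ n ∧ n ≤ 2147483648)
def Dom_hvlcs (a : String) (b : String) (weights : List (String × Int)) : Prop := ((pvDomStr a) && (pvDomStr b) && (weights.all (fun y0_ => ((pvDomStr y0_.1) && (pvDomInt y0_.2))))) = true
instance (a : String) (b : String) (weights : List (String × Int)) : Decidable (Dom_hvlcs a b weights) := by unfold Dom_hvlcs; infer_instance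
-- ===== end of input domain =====

-- B replaces A's dp table + backtracking pass by a single forward pass whose cells
-- store (value, subsequence) pairs, so no second pass is needed (objective: simpler).

-- weights[c] : first-match lookup in the association list; Pre_ excludes the
-- missing-key case (Python raises KeyError there), so a default of 0 is never used.
def wgt (weights : List (String × Int)) (c : Char) : Int :=
  (weights.lookup (String.singleton c)).getD 0

-- ===== PORT A =====
-- inner j-loop of A's fill: prev is row i-1, `left` is dp[i][j-1], emits dp[i][1..m]
def rowAgo (weights : List (String × Int)) (c : Char) (prev : List Int) :
    List Char → Nat → Int → List Int
  | [], _, _ => []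
  | bc :: bs, j, left =>
      let v := if c = bc then prev.getD j 0 + wgt weights c
               else max (prev.getD (j+1) 0) left
      v :: rowAgo weights c prev bs (j+1) v

-- outer i-loop of A's fill: the full dp table, row by row
def dpRowsA (weights : List (String × Int)) (aL bL : List Char) : List (List Int) :=
  let row0 : List Int := List.replicate (bL.length + 1) 0
  (aL.foldl (fun st c =>
      let r := (0 : Int) :: rowAgo weights c st.2 bL 0 0
      (st.1 ++ [r], r)) ([row0], row0)).1

def cellA (dp : List (List Int)) (i j : Nat) : Int := (dp.getD i []).getD j 0

-- A's backtracking while-loop; returns the collected chars in A's append order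
-- (last char first), reversed at the end exactly as A does
def btA (weights : List (String × Int)) (aL bL : List Char) (dp : List (List Int)) :
    Nat → Nat → List Char
  | i+1, j+1 =>
      let ai := aL.getD i ' '
      if ai = bL.getD j ' ' ∧ cellA dp (i+1) (j+1) = cellA dp i j + wgt weights ai then
        ai :: btA weights aL bL dp i j
      else if cellA dp i (j+1) ≥ cellA dp (i+1) j then
        btA weights aL bL dp i (j+1)
      else
        btA weights aL bL dp (i+1) j
  | _, _ => []
termination_by i j => i + j

def hvlcs (a : String) (b : String) (weights : List (String × Int)) : Int × String :=
  let aL := a.toList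
  let bL := b.toList
  let dp := dpRowsA weights aL bL
  (cellA dp aL.length bL.length,
   String.ofList ((btA weights aL bL dp aL.length bL.length).reverse))

-- ===== PORT B =====
-- inner j-loop of B: cells carry (value, subsequence); `left` is the cell just written
def rowBgo (weights : List (String × Int)) (c : Char) (prev : List (Int × String)) :
    List Char → Nat → (Int × String) → List (Int × String)
  | [], _, _ => []
  | bc :: bs, j, left =>
      let cell :=
        if c = bc then
          let p := prev.getD j (0, "")
          (p.1 + wgt weights c, p.2.push c)
        else
          let up := prev.getD (j+1) (0, "")
          if up.1 ≥ left.1 then up else left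
      cell :: rowBgo weights c prev bs (j+1) cell

def hvlcs_alt (a : String) (b : String) (weights : List (String × Int)) : Int × String :=
  let bL := b.toList
  (a.toList.foldl
      (fun prev c => ((0 : Int), "") :: rowBgo weights c prev bL 0 ((0 : Int), ""))
      (List.replicate (bL.length + 1) ((0 : Int), ""))).getD bL.length ((0 : Int), "")

-- ===== PRECONDITION & SPEC =====
-- Pre_ excludes exactly the inputs where Python A raises KeyError: a character that
-- occurs in both strings but is not a key of `weights`.
def Pre_hvlcs (a : String) (b : String) (weights : List (String × Int)) : Prop :=
  (a.toList.all fun c =>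
    !(b.toList.contains c) || weights.any fun p => p.1.toList = [c]) = true
instance (a : String) (b : String) (weights : List (String × Int)) : Decidable (Pre_hvlcs a b weights) := by unfold Pre_hvlcs; infer_instance

def pvWitness_hvlcs : String × String × (List (String × Int)) := ("ab", "b", [("b", 2)])

def Spec_hvlcs (a : String) (b : String) (weights : List (String × Int)) (out : Int × String) : Prop := out = hvlcs_alt a b weights
instance (a : String) (b : String) (weights : List (String × Int)) (out : Int × String) : Decidable (Spec_hvlcs a b weights out) := by unfold Spec_hvlcs; infer_instance

-- ===== CLAIM (what is proved, stated in full; the proofs are below) =====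
def Claim_equal_hvlcs : Prop := ∀ (a : String) (b : String) (weights : List (String × Int)), Dom_hvlcs a b weights → Pre_hvlcs a b weights → Spec_hvlcs a b weights (hvlcs a b weights)

-- ===== LEMMAS AND PROOFS =====

-- the common mathematical description of one table cell: value and subsequence
def F (weights : List (String × Int)) (aL bL : List Char) : Nat → Nat → Int × String
  | 0, _ => (0, "")
  | _+1, 0 => (0, "")
  | i+1, j+1 =>
      let c := aL.getD i ' '
      if c = bL.getD j ' ' then
        let p := F weights aL bL i j
        (p.1 + wgt weights c, p.2.push c)
      else
        let u := F weights aL bL i (j+1)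
        let l := F weights aL bL (i+1) j
        if u.1 ≥ l.1 then u else l
termination_by i j => (i, j)


lemma F_zero_left (w : List (String × Int)) (aL bL : List Char) (j : Nat) :
    F w aL bL 0 j = (0, "") := by simp [F]

lemma F_zero_right (w : List (String × Int)) (aL bL : List Char) (i : Nat) :
    F w aL bL (i+1) 0 = (0, "") := by simp [F]

lemma F_succ (w : List (String × Int)) (aL bL : List Char) (i j : Nat) :
    F w aL bL (i+1) (j+1) =
      (if aL.getD i ' ' = bL.getD j ' ' then
        ((F w aL bL i j).1 + wgt w (aL.getD i ' '), (F w aL bL i j).2.push (aL.getD i ' '))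
      else if (F w aL bL i (j+1)).1 ≥ (F w aL bL (i+1) j).1 then F w aL bL i (j+1)
      else F w aL bL (i+1) j) := by
  rw [F]

lemma rowBgo_length (w : List (String × Int)) (c : Char) (prev : List (Int × String)) :
    ∀ (bs : List Char) (j : Nat) (left : Int × String),
      (rowBgo w c prev bs j left).length = bs.length := by
  intro bs
  induction bs with
  | nil => intro j left; simp [rowBgo]
  | cons bc bs ih => intro j left; simp [rowBgo, ih]

lemma rowBgo_spec (w : List (String × Int)) (aL bL : List Char) (i : Nat)
    (prev : List (Int × String))
    (hp : ∀ k, k ≤ bL.length → prev.getD k (0, "") = F w aL bL i k) :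
    ∀ (bs : List Char) (j : Nat) (left : Int × String), bs = bL.drop j →
      left = F w aL bL (i+1) j →
      ∀ k, k < bs.length →
        (rowBgo w (aL.getD i ' ') prev bs j left).getD k (0, "") = F w aL bL (i+1) (j+k+1) := by
  intro bs
  induction bs with
  | nil => intro j left _ _ k hk; simp at hk
  | cons bc bs ih =>
    intro j left hbs hleft k hk
    have hj : j < bL.length := by
      by_contra h
      rw [List.drop_eq_nil_of_le (by omega)] at hbs
      exact List.cons_ne_nil _ _ hbs
    have hdrop := List.drop_eq_getElem_cons hj
    rw [hdrop] at hbs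
    obtain ⟨hbc, hbs'⟩ : bc = bL[j] ∧ bs = bL.drop (j+1) := by
      constructor <;> [exact (List.cons.injEq _ _ _ _ ▸ hbs).1;
                      exact (List.cons.injEq _ _ _ _ ▸ hbs).2]
    have hgd : bL.getD j ' ' = bL[j] := List.getD_eq_getElem bL ' ' hj
    have hcell :
        (if aL.getD i ' ' = bc then
          ((prev.getD j (0, "")).1 + wgt w (aL.getD i ' '),
           (prev.getD j (0, "")).2.push (aL.getD i ' '))
        else
          if (prev.getD (j+1) (0, "")).1 ≥ left.1 then prev.getD (j+1) (0, "")
          else left) = F w aL bL (i+1) (j+1) := by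
      rw [F_succ, hp j (by omega), hp (j+1) (by omega), hbc, hgd, hleft]
    cases k with
    | zero =>
      simp only [rowBgo, List.getD_cons_zero]
      exact hcell
    | succ k =>
      simp only [rowBgo, List.getD_cons_succ]
      rw [show j+(k+1)+1 = (j+1)+k+1 by omega]
      exact ih (j+1) _ hbs' hcell k (by simpa using hk)

lemma rowAgo_spec (w : List (String × Int)) (aL bL : List Char) (i : Nat)
    (prev : List Int)
    (hp : ∀ k, k ≤ bL.length → prev.getD k 0 = (F w aL bL i k).1) :
    ∀ (bs : List Char) (j : Nat) (left : Int), bs = bL.drop j →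
      left = (F w aL bL (i+1) j).1 →
      ∀ k, k < bs.length →
        (rowAgo w (aL.getD i ' ') prev bs j left).getD k 0 = (F w aL bL (i+1) (j+k+1)).1 := by
  intro bs
  induction bs with
  | nil => intro j left _ _ k hk; simp at hk
  | cons bc bs ih =>
    intro j left hbs hleft k hk
    have hj : j < bL.length := by
      by_contra h
      rw [List.drop_eq_nil_of_le (by omega)] at hbs
      exact List.cons_ne_nil _ _ hbs
    have hdrop := List.drop_eq_getElem_cons hj
    rw [hdrop] at hbs
    obtain ⟨hbc, hbs'⟩ : bc = bL[j] ∧ bs = bL.drop (j+1) := by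
      constructor <;> [exact (List.cons.injEq _ _ _ _ ▸ hbs).1;
                      exact (List.cons.injEq _ _ _ _ ▸ hbs).2]
    have hgd : bL.getD j ' ' = bL[j] := List.getD_eq_getElem bL ' ' hj
    have hcell :
        (if aL.getD i ' ' = bc then prev.getD j 0 + wgt w (aL.getD i ' ')
        else max (prev.getD (j+1) 0) left) = (F w aL bL (i+1) (j+1)).1 := by
      rw [F_succ, hp j (by omega), hp (j+1) (by omega), hbc, hgd, hleft]
      split_ifs with h1 h2
      · rfl
      · exact max_eq_left h2
      · exact max_eq_right (by omega)
    cases k with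
    | zero =>
      simp only [rowAgo, List.getD_cons_zero]
      exact hcell
    | succ k =>
      simp only [rowAgo, List.getD_cons_succ]
      rw [show j+(k+1)+1 = (j+1)+k+1 by omega]
      exact ih (j+1) _ hbs' hcell k (by simpa using hk)

-- the fold states of B's pass and of A's fill loop after i characters of a
def foldBi (w : List (String × Int)) (aL bL : List Char) (i : Nat) : List (Int × String) :=
  (aL.take i).foldl
    (fun prev c => ((0 : Int), "") :: rowBgo w c prev bL 0 ((0 : Int), ""))
    (List.replicate (bL.length + 1) ((0 : Int), ""))

def foldAi (w : List (String × Int)) (aL bL : List Char) (i : Nat) :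
    List (List Int) × List Int :=
  (aL.take i).foldl (fun st c =>
      let r := (0 : Int) :: rowAgo w c st.2 bL 0 0
      (st.1 ++ [r], r))
    ([List.replicate (bL.length + 1) (0 : Int)], List.replicate (bL.length + 1) (0 : Int))

lemma foldBi_succ (w : List (String × Int)) (aL bL : List Char) (i : Nat)
    (h : i < aL.length) :
    foldBi w aL bL (i+1) = ((0 : Int), "") :: rowBgo w aL[i] (foldBi w aL bL i) bL 0 ((0 : Int), "") := by
  unfold foldBi
  simp only [List.take_add_one, List.getElem?_eq_getElem h, Option.toList_some,
    List.foldl_append, List.foldl_cons, List.foldl_nil]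

lemma foldAi_succ (w : List (String × Int)) (aL bL : List Char) (i : Nat)
    (h : i < aL.length) :
    foldAi w aL bL (i+1) =
      ((foldAi w aL bL i).1 ++ [(0 : Int) :: rowAgo w aL[i] (foldAi w aL bL i).2 bL 0 0],
       (0 : Int) :: rowAgo w aL[i] (foldAi w aL bL i).2 bL 0 0) := by
  unfold foldAi
  simp only [List.take_add_one, List.getElem?_eq_getElem h, Option.toList_some,
    List.foldl_append, List.foldl_cons, List.foldl_nil]

-- invariant of B's forward pass
lemma foldBi_spec (w : List (String × Int)) (aL bL : List Char) :
    ∀ i, i ≤ aL.length →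
      (foldBi w aL bL i).length = bL.length + 1
      ∧ ∀ k, k ≤ bL.length → (foldBi w aL bL i).getD k (0, "") = F w aL bL i k := by
  intro i
  induction i with
  | zero =>
    intro _
    refine ⟨by simp [foldBi], ?_⟩
    intro k hk
    unfold foldBi
    rw [List.take_zero, List.foldl_nil,
        List.getD_eq_getElem _ _ (by simpa using (by omega : k < bL.length + 1))]
    simp [F_zero_left]
  | succ i ih =>
    intro hi
    have hlt : i < aL.length := by omega
    obtain ⟨hlen, hget⟩ := ih (by omega)
    rw [foldBi_succ w aL bL i hlt]
    have hc : aL[i] = aL.getD i ' ' := (List.getD_eq_getElem aL ' ' hlt).symm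
    constructor
    · simp [rowBgo_length]
    · intro k hk
      cases k with
      | zero => simp [F_zero_right]
      | succ k =>
        rw [List.getD_cons_succ, hc]
        have := rowBgo_spec w aL bL i (foldBi w aL bL i) hget bL 0 (0, "") (by simp)
          (by rw [F_zero_right]) k (by omega)
        simpa using this

-- invariant of A's fill loop
lemma foldAi_spec (w : List (String × Int)) (aL bL : List Char) :
    ∀ i, i ≤ aL.length →
      (foldAi w aL bL i).1.length = i + 1
      ∧ (∀ k, k ≤ bL.length → (foldAi w aL bL i).2.getD k 0 = (F w aL bL i k).1)
      ∧ (∀ t, t ≤ i → ∀ k, k ≤ bL.length →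
          ((foldAi w aL bL i).1.getD t []).getD k 0 = (F w aL bL t k).1) := by
  intro i
  induction i with
  | zero =>
    refine fun _ => ⟨by simp [foldAi], ?_, ?_⟩
    · intro k hk
      unfold foldAi
      rw [List.take_zero, List.foldl_nil,
          List.getD_eq_getElem _ _ (by simpa using (by omega : k < bL.length + 1))]
      simp [F_zero_left]
    · intro t ht k hk
      interval_cases t
      unfold foldAi
      rw [List.take_zero, List.foldl_nil]
      simp only [List.getD_cons_zero]
      rw [List.getD_eq_getElem _ _ (by simpa using (by omega : k < bL.length + 1))]
      simp [F_zero_left]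
  | succ i ih =>
    intro hi
    have hlt : i < aL.length := by omega
    obtain ⟨hlen, hrow, hall⟩ := ih (by omega)
    rw [foldAi_succ w aL bL i hlt]
    dsimp only
    have hc : aL[i] = aL.getD i ' ' := (List.getD_eq_getElem aL ' ' hlt).symm
    have hnewrow : ∀ k, k ≤ bL.length →
        (((0 : Int) :: rowAgo w aL[i] (foldAi w aL bL i).2 bL 0 0).getD k 0)
          = (F w aL bL (i+1) k).1 := by
      intro k hk
      cases k with
      | zero => simp [F_zero_right]
      | succ k =>
        rw [List.getD_cons_succ, hc]
        have := rowAgo_spec w aL bL i _ hrow bL 0 0 (by simp)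
          (by rw [F_zero_right]) k (by omega)
        simpa using this
    refine ⟨by simp [hlen], hnewrow, ?_⟩
    intro t ht k hk
    rcases Nat.lt_or_ge t (i+1) with h | h
    · rw [List.getD_append _ _ _ _ (by omega)]
      exact hall t (by omega) k hk
    · have ht' : t = i + 1 := by omega
      subst ht'
      rw [List.getD_append_right _ _ _ _ (by omega), hlen]
      simp only [Nat.sub_self, List.getD_cons_zero]
      exact hnewrow k hk

lemma cellA_spec (w : List (String × Int)) (aL bL : List Char) :
    ∀ i j, i ≤ aL.length → j ≤ bL.length →
      cellA (dpRowsA w aL bL) i j = (F w aL bL i j).1 := by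
  intro i j hi hj
  have hdp : dpRowsA w aL bL = (foldAi w aL bL aL.length).1 := by
    unfold dpRowsA foldAi
    rw [List.take_length]
  obtain ⟨_, _, hall⟩ := foldAi_spec w aL bL aL.length le_rfl
  rw [hdp]
  exact hall i hi j hj

lemma btA_spec (w : List (String × Int)) (aL bL : List Char) :
    ∀ s i j, i + j = s → i ≤ aL.length → j ≤ bL.length →
      btA w aL bL (dpRowsA w aL bL) i j = ((F w aL bL i j).2.toList).reverse := by
  intro s
  induction s using Nat.strong_induction_on with
  | _ s ih =>
    intro i j hs hi hj
    match i, j with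
    | 0, j => simp [btA, F_zero_left]
    | i+1, 0 => simp [btA, F_zero_right]
    | i+1, j+1 =>
      rw [btA]
      have hfs := F_succ w aL bL i j
      by_cases hm : aL.getD i ' ' = bL.getD j ' '
      · have hcond : aL.getD i ' ' = bL.getD j ' ' ∧
            cellA (dpRowsA w aL bL) (i+1) (j+1)
              = cellA (dpRowsA w aL bL) i j + wgt w (aL.getD i ' ') := by
          refine ⟨hm, ?_⟩
          rw [cellA_spec w aL bL (i+1) (j+1) hi hj,
              cellA_spec w aL bL i j (by omega) (by omega), hfs, if_pos hm]
        rw [if_pos hcond, ih (i+j) (by omega) i j rfl (by omega) (by omega), hfs, if_pos hm]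
        simp [String.toList_push]
      · have hcond : ¬(aL.getD i ' ' = bL.getD j ' ' ∧
            cellA (dpRowsA w aL bL) (i+1) (j+1)
              = cellA (dpRowsA w aL bL) i j + wgt w (aL.getD i ' ')) := fun h => hm h.1
        rw [if_neg hcond, cellA_spec w aL bL i (j+1) (by omega) hj,
            cellA_spec w aL bL (i+1) j hi (by omega), hfs, if_neg hm]
        by_cases hcmp : (F w aL bL i (j+1)).1 ≥ (F w aL bL (i+1) j).1
        · rw [if_pos hcmp, if_pos hcmp]
          exact ih (i+j+1) (by omega) i (j+1) rfl (by omega) hj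
        · rw [if_neg hcmp, if_neg hcmp]
          exact ih (i+j+1) (by omega) (i+1) j (by omega) hi (by omega)

lemma hvlcs_alt_eq_F (a b : String) (w : List (String × Int)) :
    hvlcs_alt a b w = F w a.toList b.toList a.toList.length b.toList.length := by
  have h := (foldBi_spec w a.toList b.toList a.toList.length le_rfl).2 b.toList.length le_rfl
  unfold foldBi at h
  rw [List.take_length] at h
  exact h

theorem hvlcs_spec : Claim_equal_hvlcs := by
  intro a b w _ _
  unfold Spec_hvlcs hvlcs
  dsimp only
  rw [hvlcs_alt_eq_F, cellA_spec w a.toList b.toList _ _ le_rfl le_rfl,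
      btA_spec w a.toList b.toList (a.toList.length + b.toList.length) _ _ rfl le_rfl le_rfl,
      List.reverse_reverse]
  cases F w a.toList b.toList a.toList.length b.toList.length with
  | mk v s2 => simp [String.ofList_toList]
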